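-- pv_equiv track=rewrite | github.com/BeifeiZhou/kaggle_yandex | scripts/Learn1Basic.py | Get_urls_statistic
-- ===== SOURCE A (Python) =====
-- def Get_urls_statistic(urls, user_history):
--     url_statistic = {}
--     for u in urls:
--         url_statistic[u] = 0
--     for q in user_history.keys():
--         for u in urls:
--             if(u in user_history[q]):
--                 url_statistic[u] += user_history[q][u]
--     return url_statistic
-- ===== SOURCE B (Python) =====
-- def Get_urls_statistic(urls, user_history):
--     # Total recorded count per url, in one pass over the whole history.
--     totals = {}
--     for counts in user_history.values():
--         for u, c in counts.items():
--             totals[u] = totals.get(u, 0) + c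
--     # Each occurrence of a url in the query list contributes that url's total.
--     occurrences = {}
--     for u in urls:
--         occurrences[u] = occurrences.get(u, 0) + 1
--     return {u: n * totals.get(u, 0) for u, n in occurrences.items()}
-- ===== Notes on version B (the rewrite author's own statement) =====
-- stated objective: faster
-- what changed: Instead of re-scanning the whole urls list inside every query, B aggregates all per-query counts into one totals dict in a single pass over the history, counts each url's occurrences in the query list, and builds the result as occurrences * total per distinct url; Pre_ only excludes inner association lists with duplicate keys, which correspond to no Python dict.
import Mathlib
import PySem

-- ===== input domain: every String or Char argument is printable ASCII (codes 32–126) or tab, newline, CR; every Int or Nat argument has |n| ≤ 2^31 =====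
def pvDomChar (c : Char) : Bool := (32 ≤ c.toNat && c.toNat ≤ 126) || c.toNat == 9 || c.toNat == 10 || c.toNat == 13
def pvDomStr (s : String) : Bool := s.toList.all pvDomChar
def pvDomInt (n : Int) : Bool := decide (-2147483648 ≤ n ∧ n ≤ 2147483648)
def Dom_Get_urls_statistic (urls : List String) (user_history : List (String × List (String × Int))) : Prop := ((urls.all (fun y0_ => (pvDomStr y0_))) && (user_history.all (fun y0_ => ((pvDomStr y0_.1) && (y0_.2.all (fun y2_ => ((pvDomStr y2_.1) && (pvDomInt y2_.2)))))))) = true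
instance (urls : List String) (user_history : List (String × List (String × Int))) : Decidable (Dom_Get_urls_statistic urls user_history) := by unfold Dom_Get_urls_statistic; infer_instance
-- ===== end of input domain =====

-- B aggregates all per-query counts into one totals dict in a single pass over the history,
-- counts each url's occurrences in the query list, and weights totals by that multiplicity,
-- instead of A's re-scan of the whole urls list inside every query (objective: faster).

-- ===== PORT A =====
def Get_urls_statistic (urls : List String) (user_history : List (String × List (String × Int))) : List (String × Int) :=
  -- url_statistic = {}; for u in urls: url_statistic[u] = 0
  let d0 : PySem.Dict String Int := urls.foldl (fun d u => d.insert u 0) PySem.Dict.empty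
  -- for q in user_history.keys(): for u in urls: if u in user_history[q]: url_statistic[u] += user_history[q][u]
  let fin : PySem.Dict String Int := user_history.foldl (fun d q =>
    urls.foldl (fun d u =>
      if (PySem.Dict.mk q.2).contains u
      then d.insert u (d.getD u 0 + (PySem.Dict.mk q.2).getD u 0)
      else d) d) d0
  fin.items

-- ===== PORT B =====
def Get_urls_statistic_alt (urls : List String) (user_history : List (String × List (String × Int))) : List (String × Int) :=
  -- totals = {}; for counts in user_history.values(): for u, c in counts.items(): totals[u] = totals.get(u, 0) + c
  let totals : PySem.Dict String Int := user_history.foldl (fun t q =>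
    q.2.foldl (fun t p => t.insert p.1 (t.getD p.1 0 + p.2)) t) PySem.Dict.empty
  -- occurrences = {}; for u in urls: occurrences[u] = occurrences.get(u, 0) + 1
  let occurrences : PySem.Dict String Int := urls.foldl (fun m u => m.insert u (m.getD u 0 + 1)) PySem.Dict.empty
  -- {u: n * totals.get(u, 0) for u, n in occurrences.items()}
  (occurrences.items.foldl (fun d p => d.insert p.1 (p.2 * totals.getD p.1 0)) PySem.Dict.empty).items

-- ===== PRECONDITION & SPEC =====
-- Pre_ excludes only inner association lists with duplicate keys: they represent Python
-- dicts, whose keys are unique, so such lists correspond to no Python input.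
def Pre_Get_urls_statistic (urls : List String) (user_history : List (String × List (String × Int))) : Prop :=
  ∀ q ∈ user_history, (q.2.map (·.1)).Nodup
instance (urls : List String) (user_history : List (String × List (String × Int))) : Decidable (Pre_Get_urls_statistic urls user_history) := by unfold Pre_Get_urls_statistic; infer_instance

def pvWitness_Get_urls_statistic : List String × (List (String × List (String × Int))) :=
  (["a", "b", "a"], [("q1", [("a", 2), ("c", 5)]), ("q2", [("b", 3), ("a", 1)])])

def Spec_Get_urls_statistic (urls : List String) (user_history : List (String × List (String × Int))) (out : List (String × Int)) : Prop := out = Get_urls_statistic_alt urls user_history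
instance (urls : List String) (user_history : List (String × List (String × Int))) (out : List (String × Int)) : Decidable (Spec_Get_urls_statistic urls user_history out) := by unfold Spec_Get_urls_statistic; infer_instance

-- ===== CLAIM (what is proved, stated in full; the proofs are below) =====
def Claim_equal_Get_urls_statistic : Prop := ∀ (urls : List String) (user_history : List (String × List (String × Int))), Dom_Get_urls_statistic urls user_history → Pre_Get_urls_statistic urls user_history → Spec_Get_urls_statistic urls user_history (Get_urls_statistic urls user_history)

-- ===== LEMMAS AND PROOFS =====

-- total recorded count of url u across one query's entry list
def pvFilterSum (u : String) (l : List (String × Int)) : Int :=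
  ((l.filter (fun p => p.1 == u)).map (·.2)).sum

-- the per-query contribution of url u in A: the guarded dict lookup
def pvAmount (u : String) (q : String × List (String × Int)) : Int :=
  if (PySem.Dict.mk q.2).contains u then (PySem.Dict.mk q.2).getD u 0 else 0

-- value of a guarded accumulate loop over a list of keys (A's inner loop)
lemma getD_foldl_if_insert_add (l : List String) (c : String → Bool) (f : String → Int)
    (d : PySem.Dict String Int) (u : String) :
    (l.foldl (fun d x => if c x then d.insert x (d.getD x 0 + f x) else d) d).getD u 0
      = d.getD u 0 + (l.count u : Int) * (if c u then f u else 0) := by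
  induction l generalizing d with
  | nil => simp
  | cons x xs ih =>
    simp only [List.foldl_cons, ih]
    by_cases hx : x = u
    · subst hx
      by_cases hc : c x = true
      · simp [hc, PySem.Dict.getD_insert_self]; ring
      · simp only [Bool.not_eq_true] at hc
        simp [hc]
    · by_cases hc : c x = true
      · rw [if_pos hc, PySem.Dict.getD_insert_of_ne _ _ _ (Ne.symm hx)]
        simp [hx]
      · simp only [Bool.not_eq_true] at hc
        simp [hc, hx]

-- with unique keys, the filtered sum is exactly A's guarded lookup
lemma filter_sum_eq_amount (u : String) (l : List (String × Int))
    (h : (l.map (·.1)).Nodup) :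
    pvFilterSum u l
      = if (PySem.Dict.mk l).contains u then (PySem.Dict.mk l).getD u 0 else 0 := by
  induction l with
  | nil => simp [pvFilterSum, PySem.Dict.contains_mk]
  | cons p ps ih =>
    obtain ⟨k, v⟩ := p
    simp only [List.map_cons, List.nodup_cons] at h
    unfold pvFilterSum at *
    by_cases hp : k = u
    · have hnot : ∀ r ∈ ps, ¬ (r.1 == u) = true := by
        intro r hr hb
        have hmem : r.1 ∈ ps.map (·.1) := List.mem_map_of_mem hr
        rw [show r.1 = u from by simpa using hb] at hmem
        exact h.1 (hp ▸ hmem)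
      rw [List.filter_cons_of_pos (by simpa using hp), List.filter_eq_nil_iff.mpr hnot]
      simp [PySem.Dict.contains_mk, PySem.Dict.getD_eq_get?_getD, PySem.Dict.get?_mk_cons, hp]
    · rw [List.filter_cons_of_neg (by simpa using hp)]
      rw [ih h.2]
      have hk : (k == u) = false := by simp [hp]
      simp only [PySem.Dict.contains_mk, PySem.Dict.getD_eq_get?_getD, PySem.Dict.get?_mk_cons,
        List.any_cons, hk, Bool.false_or, Bool.false_eq_true, if_false]

-- value of the zero-initialisation loop
lemma getD_foldl_insert_zero (l : List String) (d : PySem.Dict String Int) (u : String)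
    (h : d.getD u 0 = 0) :
    (l.foldl (fun d x => d.insert x (0 : Int)) d).getD u 0 = 0 := by
  induction l generalizing d with
  | nil => exact h
  | cons x xs ih =>
    simp only [List.foldl_cons]
    apply ih
    by_cases hx : x = u
    · subst hx; simp [PySem.Dict.getD_insert_self]
    · rw [PySem.Dict.getD_insert_of_ne _ _ _ (Ne.symm hx)]; exact h

-- A's final value at u
lemma valueA (urls : List String) (uh : List (String × List (String × Int)))
    (d : PySem.Dict String Int) (u : String) :
    ((uh.foldl (fun d q =>
        urls.foldl (fun d v =>
          if (PySem.Dict.mk q.2).contains v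
          then d.insert v (d.getD v 0 + (PySem.Dict.mk q.2).getD v 0)
          else d) d) d).getD u 0)
      = d.getD u 0 + (urls.count u : Int) * (uh.map (pvAmount u)).sum := by
  induction uh generalizing d with
  | nil => simp
  | cons q qs ih =>
    simp only [List.foldl_cons, ih]
    rw [getD_foldl_if_insert_add urls (fun v => (PySem.Dict.mk q.2).contains v)
      (fun v => (PySem.Dict.mk q.2).getD v 0) d u]
    simp only [pvAmount, List.map_cons, List.sum_cons]
    ring

-- value of B's inner aggregation over one query's entry list
lemma getD_foldl_pairs (l : List (String × Int)) (t : PySem.Dict String Int) (u : String) :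
    (l.foldl (fun t p => t.insert p.1 (t.getD p.1 0 + p.2)) t).getD u 0
      = t.getD u 0 + pvFilterSum u l := by
  induction l generalizing t with
  | nil => simp [pvFilterSum]
  | cons p ps ih =>
    simp only [List.foldl_cons, ih]
    by_cases hp : p.1 = u
    · have hf : pvFilterSum u (p :: ps) = p.2 + pvFilterSum u ps := by
        simp only [pvFilterSum, List.filter_cons]
        simp [hp]
      rw [hf, hp, PySem.Dict.getD_insert_self]
      ring
    · have hf : pvFilterSum u (p :: ps) = pvFilterSum u ps := by
        simp only [pvFilterSum, List.filter_cons]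
        simp [hp]
      rw [hf, PySem.Dict.getD_insert_of_ne _ _ _ (Ne.symm hp)]

-- B's totals value at u
lemma valueTotals (uh : List (String × List (String × Int))) (t : PySem.Dict String Int) (u : String) :
    ((uh.foldl (fun t q => q.2.foldl (fun t p => t.insert p.1 (t.getD p.1 0 + p.2)) t) t).getD u 0)
      = t.getD u 0 + (uh.map (fun q => pvFilterSum u q.2)).sum := by
  induction uh generalizing t with
  | nil => simp
  | cons q qs ih =>
    simp only [List.foldl_cons, ih, getD_foldl_pairs, List.map_cons, List.sum_cons]
    ring

-- keys of an accumulate loop (guarded or not) over keys drawn from urls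
lemma keys_foldl_if_insert (l : List String) (c : String → Bool) (f : String → Int)
    (d : PySem.Dict String Int) (h : ∀ x ∈ l, d.contains x = true) :
    (l.foldl (fun d x => if c x then d.insert x (d.getD x 0 + f x) else d) d).keys = d.keys := by
  induction l generalizing d with
  | nil => rfl
  | cons x xs ih =>
    simp only [List.foldl_cons]
    by_cases hc : c x = true
    · rw [if_pos hc, ih]
      · exact PySem.Dict.keys_insert_of_contains _ _ (h x (by simp))
      · intro y hy
        rw [PySem.Dict.contains_insert]
        simp [h y (List.mem_cons_of_mem _ hy)]
    · rw [if_neg (by simp [hc])]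
      exact ih d (fun y hy => h y (List.mem_cons_of_mem _ hy))

lemma containsA (urls : List String) (uh : List (String × List (String × Int)))
    (d : PySem.Dict String Int) (h : ∀ x ∈ urls, d.contains x = true) :
    (uh.foldl (fun d q =>
        urls.foldl (fun d v =>
          if (PySem.Dict.mk q.2).contains v
          then d.insert v (d.getD v 0 + (PySem.Dict.mk q.2).getD v 0)
          else d) d) d).keys = d.keys := by
  induction uh generalizing d with
  | nil => rfl
  | cons q qs ih =>
    simp only [List.foldl_cons]
    rw [ih, keys_foldl_if_insert urls _ _ d h]
    intro y hy
    rw [PySem.Dict.contains_iff_mem_keys, keys_foldl_if_insert urls _ _ d h,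
      ← PySem.Dict.contains_iff_mem_keys]
    exact h y hy

-- both results are the same map over the distinct urls, value = multiplicity * total
lemma results_as_maps (urls : List String) (uh : List (String × List (String × Int)))
    (hpre : ∀ q ∈ uh, (q.2.map (·.1)).Nodup) :
    Get_urls_statistic urls uh
      = (PySem.Set.ofList urls).map (fun k =>
          (k, (urls.count k : Int) * (uh.map (fun q => pvFilterSum k q.2)).sum))
    ∧ Get_urls_statistic_alt urls uh
      = (PySem.Set.ofList urls).map (fun k =>
          (k, (urls.count k : Int) * (uh.map (fun q => pvFilterSum k q.2)).sum)) := by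
  unfold Get_urls_statistic Get_urls_statistic_alt
  simp only
  have hS : ∀ u, (uh.map (pvAmount u)).sum = (uh.map (fun q => pvFilterSum u q.2)).sum := by
    intro u
    congr 1
    apply List.map_congr_left
    intro q hq
    rw [filter_sum_eq_amount u q.2 (hpre q hq)]
    rfl
  constructor
  · -- A
    set d0 : PySem.Dict String Int := urls.foldl (fun d u => d.insert u 0) PySem.Dict.empty with hd0
    have hk0 : d0.keys = PySem.Set.ofList urls := by
      rw [hd0, PySem.Dict.keys_foldl_insert]
      simp [PySem.Set.update, PySem.Set.ofList]
    have hnod0 : d0.keys.Nodup := PySem.Dict.nodup_keys_foldl_insert _ _ _ (by simp)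
    have hz : ∀ u, d0.getD u 0 = 0 := fun u =>
      getD_foldl_insert_zero urls PySem.Dict.empty u (by simp)
    set finA : PySem.Dict String Int := uh.foldl (fun d q =>
      urls.foldl (fun d u =>
        if (PySem.Dict.mk q.2).contains u
        then d.insert u (d.getD u 0 + (PySem.Dict.mk q.2).getD u 0)
        else d) d) d0 with hfinA
    have hkA : finA.keys = PySem.Set.ofList urls := by
      rw [hfinA, containsA urls uh d0, hk0]
      intro x hx
      rw [PySem.Dict.contains_iff_mem_keys, hk0]
      exact (PySem.Set.mem_ofList urls x).mpr hx
    have hnodA : finA.keys.Nodup := by rw [hkA, ← hk0]; exact hnod0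
    rw [PySem.Dict.items_eq_map_keys finA hnodA 0, hkA]
    apply List.map_congr_left
    intro k _
    rw [hfinA, valueA, hz, hS]
    simp
  · -- B
    set totals : PySem.Dict String Int := uh.foldl (fun t q =>
      q.2.foldl (fun t p => t.insert p.1 (t.getD p.1 0 + p.2)) t) PySem.Dict.empty with htot
    have hT : ∀ u, totals.getD u 0 = (uh.map (fun q => pvFilterSum u q.2)).sum := by
      intro u
      rw [htot, valueTotals]
      simp
    -- occurrences = Counter(urls)
    rw [PySem.Dict.foldl_insert_getD_add_one_eq_counter]
    -- the result comprehension inserts the counter's distinct keys, all fresh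
    have hfresh := PySem.Dict.items_foldl_insert_fresh
      ((PySem.Dict.counter urls).items) (fun p => p.1)
      (fun p => p.2 * totals.getD p.1 0) PySem.Dict.empty
      (by intro a _; simp)
      (by
        have hkk : ((PySem.Dict.counter urls).items.map (fun p => p.1)) = (PySem.Dict.counter urls).keys := rfl
        rw [hkk]
        exact PySem.Dict.nodup_keys_counter urls)
    rw [hfresh, PySem.Dict.items_counter, List.map_map]
    simp only [show (PySem.Dict.empty : PySem.Dict String Int).items = [] from rfl, List.nil_append]
    apply List.map_congr_left
    intro k _
    simp [hT k]

-- ===== VERDICT (by name: the statement is the Claim_ definition above) =====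
theorem Get_urls_statistic_spec : Claim_equal_Get_urls_statistic := by
  intro urls uh _ hpre
  obtain ⟨hA, hB⟩ := results_as_maps urls uh hpre
  unfold Spec_Get_urls_statistic
  rw [hA, hB]
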